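-- pv_equiv track=rewrite | github.com/Rodomonte/chef | archive/AUG19A/ENCODING.py | fn
-- ===== SOURCE A (Python) =====
-- MOD = 1000000007
--
-- def madd(a, b): return a + b - MOD if a + b >= MOD else a + b
--
-- def msub(a, b): return a - b + MOD if a - b < 0 else a - b
--
-- def mmul(a, b): return a * b % MOD
--
-- def fn(n):
--   if n < 10: return n * (n+1) // 2
--   s = '00' + str(n)
--   N = len(s)
--
--   e = [0 for i in range(N)]
--   e[N-1] = 1
--   for i in range(N-2, -1, -1):
--     e[i] = mmul(e[i+1], 10)
--
--   e2 = [0 for i in range(N)]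
--   e2[N-1] = 1
--   for i in range(N-2, -1, -1):
--     e2[i] = mmul(e2[i+1], 100)
--
--   a = [0 for i in range(len(s)+1)]
--   a[N-1] = int(s[N-1])
--   for i in range(N-2, -1, -1):
--     a[i] = madd(mmul(int(s[i]), e[i]), a[i+1])
--
--   b = [0 for i in range(len(s))]
--   b[0] = int(s[0])
--   for i in range(1, N):
--     b[i] = madd(mmul(b[i-1], 10), int(s[i]))
--
--   r = 0
--   for i in range(N-1, 1, -1):
--     d = int(s[i-1])
--     for j in range(1, d):
--       r = madd(r, mmul(mmul(madd(b[i-2], 1), j), e2[i]))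
--     if d < int(s[i]):
--       r = madd(r, mmul(mmul(madd(b[i-2], 1), d), e2[i]))
--     elif d >= int(s[i]):
--       r = madd(r, mmul(mmul(b[i-2], d), e2[i]))
--     if d == int(s[i]):
--       r = madd(r, mmul(mmul(madd(a[i+1], 1), d), e[i]))
--     for j in range(d+1, 10):
--       r = madd(r, mmul(mmul(b[i-2], j), e2[i]))
--
--   t = n if n % 2 == 1 else n // 2
--   u = n + 1 if (n + 1) % 2 == 1 else (n + 1) // 2
--   return msub(mmul(t % MOD, u % MOD), r)
-- ===== SOURCE B (Python) =====
-- MOD = 1000000007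
--
-- def fn(n):
--     # One arithmetic pass over n's digits via divmod; no string, no precomputed arrays,
--     # inner digit loops replaced by closed-form triangular sums.
--     if n < 10:
--         return n * (n + 1) // 2
--     r = 0
--     suf = 0          # value of the digits already consumed (the suffix), mod MOD
--     pw = 1           # 10^k mod MOD
--     pw2 = 1          # 100^k mod MOD
--     m = n
--     while m > 0:
--         c = m % 10            # current digit
--         d = m // 10 % 10      # digit to its left (0 above the top digit)
--         pre = m // 100 % MOD  # prefix value left of d, mod MOD
--         term = (pre + 1) * (d * (d - 1) // 2) + pre * (45 - d * (d + 1) // 2)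
--         term += ((pre + 1) if d < c else pre) * d
--         r = (r + term * pw2) % MOD
--         if d == c:
--             r = (r + (suf + 1) * d * pw) % MOD
--         suf = (suf + c * pw) % MOD
--         pw = pw * 10 % MOD
--         pw2 = pw2 * 100 % MOD
--         m //= 10
--     t = n if n % 2 == 1 else n // 2
--     u = n + 1 if (n + 1) % 2 == 1 else (n + 1) // 2
--     return (t % MOD * (u % MOD) - r) % MOD
-- ===== Notes on version B (the rewrite author's own statement) =====
-- stated objective: simpler
-- what changed: B drops the string conversion, the four precomputed arrays (e, e2, a, b) and the two inner digit loops of A, and instead runs one divmod-driven loop over the integer itself, maintaining a rolling power of ten and its square plus a rolling suffix value, reading the prefix by integer division, and replacing each inner digit loop by its closed-form triangular sum.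
import Mathlib
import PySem

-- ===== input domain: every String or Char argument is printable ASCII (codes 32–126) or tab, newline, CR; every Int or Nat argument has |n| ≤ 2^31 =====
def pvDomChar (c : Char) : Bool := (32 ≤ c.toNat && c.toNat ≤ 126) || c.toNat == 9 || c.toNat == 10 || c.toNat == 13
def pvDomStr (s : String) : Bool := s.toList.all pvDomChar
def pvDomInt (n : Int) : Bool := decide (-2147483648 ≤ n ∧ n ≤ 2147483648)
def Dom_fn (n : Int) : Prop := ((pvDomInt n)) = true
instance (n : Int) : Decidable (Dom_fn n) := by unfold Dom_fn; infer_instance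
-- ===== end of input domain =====

-- B replaces A's string pass and four precomputed arrays (e, e2, a, b) by a single
-- arithmetic loop over n's digits via divmod, with the inner digit loops replaced by
-- closed-form triangular sums (objective: simpler/alternative decomposition).

-- ===== PORT A =====
def pvM : Int := 1000000007          -- module constant MOD

def madd (a b : Int) : Int := if a + b ≥ pvM then a + b - pvM else a + b
def msub (a b : Int) : Int := if a - b < 0 then a - b + pvM else a - b
def mmul (a b : Int) : Int := PySem.Int.mod (a * b) pvM
-- int(s[i]) for one char; everywhere A applies it the char is a decimal digit (ofChars? = some)
def charInt (c : Char) : Int := (PySem.Int.ofChars? [c]).getD 0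

def fn (n : Int) : Int :=
  if n < 10 then PySem.Int.floordiv (n * (n + 1)) 2 else
  let s : List Char := '0' :: '0' :: PySem.Int.toChars n
  let N : Nat := s.length
  let e : List Int :=
    (PySem.List.pyRange ((N : Int) - 2) (-1) (-1)).foldl
      (fun E i => E.set i.toNat (mmul (PySem.List.pyGetD E (i + 1) 0) 10))
      ((List.replicate N 0).set (N - 1) 1)
  let e2 : List Int :=
    (PySem.List.pyRange ((N : Int) - 2) (-1) (-1)).foldl
      (fun E i => E.set i.toNat (mmul (PySem.List.pyGetD E (i + 1) 0) 100))
      ((List.replicate N 0).set (N - 1) 1)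
  let a : List Int :=
    (PySem.List.pyRange ((N : Int) - 2) (-1) (-1)).foldl
      (fun A i => A.set i.toNat (madd (mmul (charInt (PySem.List.pyGetD s i ' ')) (PySem.List.pyGetD e i 0)) (PySem.List.pyGetD A (i + 1) 0)))
      ((List.replicate (N + 1) 0).set (N - 1) (charInt (PySem.List.pyGetD s ((N : Int) - 1) ' ')))
  let b : List Int :=
    (PySem.List.pyRange 1 (N : Int) 1).foldl
      (fun B i => B.set i.toNat (madd (mmul (PySem.List.pyGetD B (i - 1) 0) 10) (charInt (PySem.List.pyGetD s i ' '))))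
      ((List.replicate N 0).set 0 (charInt (PySem.List.pyGetD s 0 ' ')))
  let r : Int :=
    (PySem.List.pyRange ((N : Int) - 1) 1 (-1)).foldl
      (fun r i =>
        let d := charInt (PySem.List.pyGetD s (i - 1) ' ')
        let r := (PySem.List.pyRange 1 d 1).foldl
          (fun r j => madd r (mmul (mmul (madd (PySem.List.pyGetD b (i - 2) 0) 1) j) (PySem.List.pyGetD e2 i 0))) r
        let r := if d < charInt (PySem.List.pyGetD s i ' ') then
            madd r (mmul (mmul (madd (PySem.List.pyGetD b (i - 2) 0) 1) d) (PySem.List.pyGetD e2 i 0))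
          else if d ≥ charInt (PySem.List.pyGetD s i ' ') then
            madd r (mmul (mmul (PySem.List.pyGetD b (i - 2) 0) d) (PySem.List.pyGetD e2 i 0))
          else r
        let r := if d = charInt (PySem.List.pyGetD s i ' ') then
            madd r (mmul (mmul (madd (PySem.List.pyGetD a (i + 1) 0) 1) d) (PySem.List.pyGetD e i 0))
          else r
        (PySem.List.pyRange (d + 1) 10 1).foldl
          (fun r j => madd r (mmul (mmul (PySem.List.pyGetD b (i - 2) 0) j) (PySem.List.pyGetD e2 i 0))) r)
      0
  let t := if PySem.Int.mod n 2 = 1 then n else PySem.Int.floordiv n 2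
  let u := if PySem.Int.mod (n + 1) 2 = 1 then n + 1 else PySem.Int.floordiv (n + 1) 2
  msub (mmul (PySem.Int.mod t pvM) (PySem.Int.mod u pvM)) r

-- ===== PORT B =====
-- the `while m > 0` loop of Source B, one recursive step per iteration
def fnAltGo (m r suf pw pw2 : Int) : Int :=
  if h : 0 < m then
    let c := PySem.Int.mod m 10
    let d := PySem.Int.mod (PySem.Int.floordiv m 10) 10
    let pre := PySem.Int.mod (PySem.Int.floordiv m 100) pvM
    let term := (pre + 1) * PySem.Int.floordiv (d * (d - 1)) 2 +
                pre * (45 - PySem.Int.floordiv (d * (d + 1)) 2)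
    let term := term + (if d < c then pre + 1 else pre) * d
    let r := PySem.Int.mod (r + term * pw2) pvM
    let r := if d = c then PySem.Int.mod (r + (suf + 1) * d * pw) pvM else r
    fnAltGo (PySem.Int.floordiv m 10) r (PySem.Int.mod (suf + c * pw) pvM)
      (PySem.Int.mod (pw * 10) pvM) (PySem.Int.mod (pw2 * 100) pvM)
  else r
termination_by m.toNat
decreasing_by
  have h10 : PySem.Int.floordiv m 10 = m / 10 := PySem.Int.floordiv_eq_ediv_of_pos (by norm_num)
  rw [h10]
  omega

def fn_alt (n : Int) : Int :=
  if n < 10 then PySem.Int.floordiv (n * (n + 1)) 2 else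
  let r := fnAltGo n 0 0 1 1
  let t := if PySem.Int.mod n 2 = 1 then n else PySem.Int.floordiv n 2
  let u := if PySem.Int.mod (n + 1) 2 = 1 then n + 1 else PySem.Int.floordiv (n + 1) 2
  PySem.Int.mod (PySem.Int.mod t pvM * PySem.Int.mod u pvM - r) pvM

-- ===== PRECONDITION & SPEC =====
def Spec_fn (n : Int) (out : Int) : Prop := out = fn_alt n
instance (n : Int) (out : Int) : Decidable (Spec_fn n out) := by unfold Spec_fn; infer_instance

-- ===== CLAIM (what is proved, stated in full; the proofs are below) =====
def Claim_equal_fn : Prop := ∀ (n : Int), Dom_fn n → Spec_fn n (fn n)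

-- ===== LEMMAS AND PROOFS =====

def dig (ν k : ℕ) : ℕ := ν / 10 ^ k % 10

theorem Mpos : (0 : ℤ) < pvM := by norm_num [pvM]

theorem emod_rng1 (z : ℤ) : 0 ≤ z % pvM := Int.emod_nonneg z (by norm_num [pvM])
theorem emod_rng2 (z : ℤ) : z % pvM < pvM := Int.emod_lt_of_pos z Mpos

theorem madd_eq (a b : ℤ) (h1 : 0 ≤ a) (h2 : a < pvM) (h3 : 0 ≤ b) (h4 : b < pvM) :
    madd a b = (a + b) % pvM := by
  simp only [madd, pvM] at *; split_ifs with h <;> omega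

theorem mmul_eq (a b : ℤ) : mmul a b = a * b % pvM := by
  simp only [mmul, PySem.Int.mod_eq_emod_of_pos Mpos]

theorem msub_eq (a b : ℤ) (h1 : 0 ≤ a) (h2 : a < pvM) (h3 : 0 ≤ b) (h4 : b < pvM) :
    msub a b = (a - b) % pvM := by
  simp only [msub, pvM] at *; split_ifs with h <;> omega

theorem cast_emod_pvM (a : ℤ) : ((a % pvM : ℤ) : ZMod 1000000007) = (a : ZMod 1000000007) := by
  rw [show pvM = ((1000000007 : ℕ) : ℤ) by norm_num [pvM]]
  exact ZMod.intCast_mod a 1000000007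

theorem emod_congr {P Q : ℤ} (h : (P : ZMod 1000000007) = (Q : ZMod 1000000007)) :
    P % pvM = Q % pvM := by
  have h2 := (ZMod.intCast_eq_intCast_iff P Q 1000000007).mp h
  rw [show pvM = ((1000000007 : ℕ) : ℤ) by norm_num [pvM]]
  exact h2

theorem pyRange_down (a b : ℤ) (h : b ≤ a) :
    PySem.List.pyRange a b (-1) = (List.range (a - b).toNat).map (fun k : ℕ => a - (k : ℤ)) := by
  rcases eq_or_lt_of_le h with h' | h'
  · subst h'
    simp [PySem.List.pyRange]
  · simp only [PySem.List.pyRange]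
    rw [if_neg (by norm_num)]
    simp only [show ¬(0:ℤ) < -1 by norm_num, if_false, if_pos h']
    rw [show (a - b + - -1 - 1) / - -1 = a - b by norm_num]
    apply List.map_congr_left
    intro k _; ring

theorem pyRange_up (a b : ℤ) (h : a ≤ b) :
    PySem.List.pyRange a b 1 = (List.range (b - a).toNat).map (fun k : ℕ => a + (k : ℤ)) := by
  rcases eq_or_lt_of_le h with h' | h'
  · subst h'
    simp [PySem.List.pyRange]
  · simp only [PySem.List.pyRange]
    rw [if_neg (by norm_num)]
    simp only [show (0:ℤ) < 1 by norm_num, if_true, if_pos h']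
    rw [show (b - a + 1 - 1) / 1 = b - a by norm_num]
    apply List.map_congr_left
    intro k _; ring

theorem charInt_digitChar (d : ℕ) (hd : d < 10) : charInt (Nat.digitChar d) = (d : ℤ) := by
  interval_cases d <;> decide

theorem dig_lt (ν k : ℕ) : dig ν k < 10 := Nat.mod_lt _ (by norm_num)

theorem toDigitsCore_eq (f : ℕ) : ∀ (n : ℕ) (l : List Char), 0 < n → n < f →
    Nat.toDigitsCore 10 f n l = ((Nat.digits 10 n).map Nat.digitChar).reverse ++ l := by
  induction f with
  | zero => intro n l h0 hf; omega
  | succ f ih =>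
    intro n l h0 hf
    rw [Nat.toDigitsCore]
    by_cases hx : n / 10 = 0
    · simp only [hx, if_true]
      rw [Nat.digits_def' (by norm_num : 1 < 10) h0, hx, Nat.digits_zero]
      simp
    · simp only [hx, if_false]
      rw [ih (n / 10) _ (Nat.pos_of_ne_zero hx) (by
        have := Nat.div_lt_self h0 (by norm_num : 1 < 10); omega)]
      rw [Nat.digits_def' (by norm_num : 1 < 10) h0]
      simp

theorem toChars_eq (ν : ℕ) (h : 0 < ν) :
    PySem.Int.toChars (ν : ℤ) = ((Nat.digits 10 ν).map Nat.digitChar).reverse := by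
  simp only [PySem.Int.toChars, show ¬((ν : ℤ) < 0) by omega, if_false, Int.toNat_natCast]
  show Nat.toDigitsCore 10 (ν + 1) ν [] = _
  rw [toDigitsCore_eq (ν + 1) ν [] h (by omega)]
  simp

theorem digits_getElem (ν : ℕ) : ∀ k, (h : k < (Nat.digits 10 ν).length) →
    (Nat.digits 10 ν)[k] = dig ν k := by
  induction ν using Nat.strong_induction_on with
  | _ ν ih =>
    intro k hk
    have hν : ν ≠ 0 := by
      intro h0; subst h0; simp at hk
    simp only [Nat.digits_def' (by norm_num : 1 < 10) (Nat.pos_of_ne_zero hν)] at hk ⊢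
    cases k with
    | zero => simp [dig]
    | succ k =>
      simp only [List.getElem_cons_succ]
      rw [ih (ν / 10) (Nat.div_lt_self (Nat.pos_of_ne_zero hν) (by norm_num)) k
        (by simpa using hk)]
      simp [dig, Nat.div_div_eq_div_mul, pow_succ]
      ring_nf

theorem range_map_cons (c : ℕ) (f : ℕ → ℤ) :
    (List.range (c + 1)).map f = f 0 :: (List.range c).map (fun k => f (k + 1)) := by
  rw [List.range_succ_eq_map, List.map_cons, List.map_map]
  rfl

theorem fold_set_down (Nn : ℕ) (g : ℤ → ℤ → ℤ) (h : ℕ → ℤ) :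
    ∀ (c : ℕ) (E : List ℤ), E.length = Nn → c < Nn →
    (∀ j, c ≤ j → j < Nn → E.getD j 0 = h j) →
    (∀ j, j < c → h j = g (j : ℤ) (h (j + 1))) →
    (((List.range c).map (fun k : ℕ => (c : ℤ) - 1 - k)).foldl
        (fun E i => E.set i.toNat (g i (PySem.List.pyGetD E (i + 1) 0))) E).length = Nn ∧
    (∀ j, j < Nn → (((List.range c).map (fun k : ℕ => (c : ℤ) - 1 - k)).foldl
        (fun E i => E.set i.toNat (g i (PySem.List.pyGetD E (i + 1) 0))) E).getD j 0 = h j) := by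
  intro c
  induction c with
  | zero =>
    intro E hlen _ hinv _
    simp only [List.range_zero, List.map_nil, List.foldl_nil]
    exact ⟨hlen, fun j hj => hinv j (Nat.zero_le j) hj⟩
  | succ c ih =>
    intro E hlen hc hinv hstep
    rw [range_map_cons]
    simp only [List.foldl_cons]
    have hlist : (List.range c).map (fun k : ℕ => (↑(c+1) : ℤ) - 1 - ↑(k+1)) =
        (List.range c).map (fun k : ℕ => (c : ℤ) - 1 - k) := by
      apply List.map_congr_left; intro k _; push_cast; ring
    have hhead : ((↑(c+1) : ℤ) - 1 - (↑(0:ℕ) : ℤ)) = (c : ℤ) := by push_cast; ring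
    rw [hhead, hlist]
    -- the one processed element
    have hread : PySem.List.pyGetD E ((c : ℤ) + 1) 0 = h (c + 1) := by
      rw [PySem.List.pyGetD_of_nonneg E 0 (by positivity)]
      rw [show ((c : ℤ) + 1).toNat = c + 1 by omega]
      exact hinv (c + 1) (le_refl _) (by omega)
    have hset : (E.set (c : ℤ).toNat (g (c : ℤ) (PySem.List.pyGetD E ((c : ℤ) + 1) 0))) =
        E.set c (h c) := by
      rw [hread, Int.toNat_natCast, hstep c (by omega)]
    rw [hset]
    apply ih (E.set c (h c)) (by simpa using hlen) (by omega)
    · intro j hj hj'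
      rw [List.getD_eq_getElem _ _ (by simpa [hlen] using hj'), List.getElem_set]
      split_ifs with hcj
      · subst hcj; rfl
      · rw [← List.getD_eq_getElem _ 0 (by simpa [hlen] using hj')]
        exact hinv j (by omega) hj'
    · intro j hj; exact hstep j (by omega)

theorem fold_set_up (Nn : ℕ) (g : ℤ → ℤ → ℤ) (h : ℕ → ℤ) :
    ∀ (c : ℕ) (t : ℕ) (E : List ℤ), E.length = Nn → 1 ≤ t → t + c ≤ Nn →
    (∀ j, j < t → E.getD j 0 = h j) →
    (∀ j, 1 ≤ j → j < Nn → h j = g (j : ℤ) (h (j - 1))) →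
    (((List.range c).map (fun k : ℕ => (t : ℤ) + k)).foldl
        (fun B i => B.set i.toNat (g i (PySem.List.pyGetD B (i - 1) 0))) E).length = Nn ∧
    (∀ j, j < t + c → (((List.range c).map (fun k : ℕ => (t : ℤ) + k)).foldl
        (fun B i => B.set i.toNat (g i (PySem.List.pyGetD B (i - 1) 0))) E).getD j 0 = h j) := by
  intro c
  induction c with
  | zero =>
    intro t E hlen _ _ hinv _
    simp only [List.range_zero, List.map_nil, List.foldl_nil]
    exact ⟨hlen, fun j hj => hinv j (by omega)⟩
  | succ c ih =>
    intro t E hlen ht htc hinv hstep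
    rw [range_map_cons]
    simp only [List.foldl_cons]
    have hlist : (List.range c).map (fun k : ℕ => (t : ℤ) + ↑(k+1)) =
        (List.range c).map (fun k : ℕ => ((t+1 : ℕ) : ℤ) + k) := by
      apply List.map_congr_left; intro k _; push_cast; ring
    rw [show ((t : ℤ) + (↑(0:ℕ) : ℤ)) = (t : ℤ) by push_cast; ring, hlist]
    have hread : PySem.List.pyGetD E ((t : ℤ) - 1) 0 = h (t - 1) := by
      rw [PySem.List.pyGetD_of_nonneg E 0 (by omega)]
      rw [show ((t : ℤ) - 1).toNat = t - 1 by omega]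
      exact hinv (t - 1) (by omega)
    have hset : (E.set (t : ℤ).toNat (g (t : ℤ) (PySem.List.pyGetD E ((t : ℤ) - 1) 0))) =
        E.set t (h t) := by
      rw [hread, Int.toNat_natCast, show h (t-1) = h ((t:ℕ) - 1) by rfl,
        ← hstep t (by omega) (by omega)]
    rw [hset]
    have hmain := ih (t + 1) (E.set t (h t)) (by simpa using hlen) (by omega) (by omega)
      (by
        intro j hj
        rw [List.getD_eq_getElem _ _ (by simp [hlen]; omega), List.getElem_set]
        split_ifs with hcj
        · subst hcj; rfl
        · rw [← List.getD_eq_getElem _ 0 (by simp [hlen]; omega)]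
          exact hinv j (by omega))
      hstep
    exact ⟨hmain.1, fun j hj => hmain.2 j (by omega)⟩

theorem prA0 : PySem.List.pyRange 1 (0:ℤ) 1 = [] := by decide
theorem prA1 : PySem.List.pyRange 1 (1:ℤ) 1 = [] := by decide
theorem prA2 : PySem.List.pyRange 1 (2:ℤ) 1 = [1] := by decide
theorem prA3 : PySem.List.pyRange 1 (3:ℤ) 1 = [1, 2] := by decide
theorem prA4 : PySem.List.pyRange 1 (4:ℤ) 1 = [1, 2, 3] := by decide
theorem prA5 : PySem.List.pyRange 1 (5:ℤ) 1 = [1, 2, 3, 4] := by decide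
theorem prA6 : PySem.List.pyRange 1 (6:ℤ) 1 = [1, 2, 3, 4, 5] := by decide
theorem prA7 : PySem.List.pyRange 1 (7:ℤ) 1 = [1, 2, 3, 4, 5, 6] := by decide
theorem prA8 : PySem.List.pyRange 1 (8:ℤ) 1 = [1, 2, 3, 4, 5, 6, 7] := by decide
theorem prA9 : PySem.List.pyRange 1 (9:ℤ) 1 = [1, 2, 3, 4, 5, 6, 7, 8] := by decide
theorem prB0 : PySem.List.pyRange ((0:ℤ) + 1) 10 1 = [1,2,3,4,5,6,7,8,9] := by decide
theorem prB1 : PySem.List.pyRange ((1:ℤ) + 1) 10 1 = [2,3,4,5,6,7,8,9] := by decide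
theorem prB2 : PySem.List.pyRange ((2:ℤ) + 1) 10 1 = [3,4,5,6,7,8,9] := by decide
theorem prB3 : PySem.List.pyRange ((3:ℤ) + 1) 10 1 = [4,5,6,7,8,9] := by decide
theorem prB4 : PySem.List.pyRange ((4:ℤ) + 1) 10 1 = [5,6,7,8,9] := by decide
theorem prB5 : PySem.List.pyRange ((5:ℤ) + 1) 10 1 = [6,7,8,9] := by decide
theorem prB6 : PySem.List.pyRange ((6:ℤ) + 1) 10 1 = [7,8,9] := by decide
theorem prB7 : PySem.List.pyRange ((7:ℤ) + 1) 10 1 = [8,9] := by decide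
theorem prB8 : PySem.List.pyRange ((8:ℤ) + 1) 10 1 = [9] := by decide
theorem prB9 : PySem.List.pyRange ((9:ℤ) + 1) 10 1 = [] := by decide
theorem fdm0 : PySem.Int.floordiv ((0:ℤ) * ((0:ℤ) - 1)) 2 = 0 := by decide
theorem fdm1 : PySem.Int.floordiv ((1:ℤ) * ((1:ℤ) - 1)) 2 = 0 := by decide
theorem fdm2 : PySem.Int.floordiv ((2:ℤ) * ((2:ℤ) - 1)) 2 = 1 := by decide
theorem fdm3 : PySem.Int.floordiv ((3:ℤ) * ((3:ℤ) - 1)) 2 = 3 := by decide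
theorem fdm4 : PySem.Int.floordiv ((4:ℤ) * ((4:ℤ) - 1)) 2 = 6 := by decide
theorem fdm5 : PySem.Int.floordiv ((5:ℤ) * ((5:ℤ) - 1)) 2 = 10 := by decide
theorem fdm6 : PySem.Int.floordiv ((6:ℤ) * ((6:ℤ) - 1)) 2 = 15 := by decide
theorem fdm7 : PySem.Int.floordiv ((7:ℤ) * ((7:ℤ) - 1)) 2 = 21 := by decide
theorem fdm8 : PySem.Int.floordiv ((8:ℤ) * ((8:ℤ) - 1)) 2 = 28 := by decide
theorem fdm9 : PySem.Int.floordiv ((9:ℤ) * ((9:ℤ) - 1)) 2 = 36 := by decide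
theorem fdp0 : PySem.Int.floordiv ((0:ℤ) * ((0:ℤ) + 1)) 2 = 0 := by decide
theorem fdp1 : PySem.Int.floordiv ((1:ℤ) * ((1:ℤ) + 1)) 2 = 1 := by decide
theorem fdp2 : PySem.Int.floordiv ((2:ℤ) * ((2:ℤ) + 1)) 2 = 3 := by decide
theorem fdp3 : PySem.Int.floordiv ((3:ℤ) * ((3:ℤ) + 1)) 2 = 6 := by decide
theorem fdp4 : PySem.Int.floordiv ((4:ℤ) * ((4:ℤ) + 1)) 2 = 10 := by decide
theorem fdp5 : PySem.Int.floordiv ((5:ℤ) * ((5:ℤ) + 1)) 2 = 15 := by decide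
theorem fdp6 : PySem.Int.floordiv ((6:ℤ) * ((6:ℤ) + 1)) 2 = 21 := by decide
theorem fdp7 : PySem.Int.floordiv ((7:ℤ) * ((7:ℤ) + 1)) 2 = 28 := by decide
theorem fdp8 : PySem.Int.floordiv ((8:ℤ) * ((8:ℤ) + 1)) 2 = 36 := by decide
theorem fdp9 : PySem.Int.floordiv ((9:ℤ) * ((9:ℤ) + 1)) 2 = 45 := by decide

theorem step_eq (p w w2 suf r : ℤ) (dd cc : ℕ) (hd : dd < 10) (hc : cc < 10)
    (hp1 : 0 ≤ p) (hp2 : p < pvM) (hs1 : 0 ≤ suf) (hs2 : suf < pvM)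
    (hr1 : 0 ≤ r) (hr2 : r < pvM) :
    ((PySem.List.pyRange ((dd:ℤ) + 1) 10 1).foldl (fun r j => madd r (mmul (mmul p j) w2))
      (if (dd:ℤ) = (cc:ℤ) then
        madd
          (if (dd:ℤ) < (cc:ℤ) then
            madd ((PySem.List.pyRange 1 (dd:ℤ) 1).foldl
                (fun r j => madd r (mmul (mmul (madd p 1) j) w2)) r)
              (mmul (mmul (madd p 1) (dd:ℤ)) w2)
          else if (dd:ℤ) ≥ (cc:ℤ) then
            madd ((PySem.List.pyRange 1 (dd:ℤ) 1).foldl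
                (fun r j => madd r (mmul (mmul (madd p 1) j) w2)) r)
              (mmul (mmul p (dd:ℤ)) w2)
          else ((PySem.List.pyRange 1 (dd:ℤ) 1).foldl
                (fun r j => madd r (mmul (mmul (madd p 1) j) w2)) r))
          (mmul (mmul (madd suf 1) (dd:ℤ)) w)
      else
        (if (dd:ℤ) < (cc:ℤ) then
            madd ((PySem.List.pyRange 1 (dd:ℤ) 1).foldl
                (fun r j => madd r (mmul (mmul (madd p 1) j) w2)) r)
              (mmul (mmul (madd p 1) (dd:ℤ)) w2)
          else if (dd:ℤ) ≥ (cc:ℤ) then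
            madd ((PySem.List.pyRange 1 (dd:ℤ) 1).foldl
                (fun r j => madd r (mmul (mmul (madd p 1) j) w2)) r)
              (mmul (mmul p (dd:ℤ)) w2)
          else ((PySem.List.pyRange 1 (dd:ℤ) 1).foldl
                (fun r j => madd r (mmul (mmul (madd p 1) j) w2)) r))))
    =
    (if (dd:ℤ) = (cc:ℤ) then
      ((r + ((p + 1) * PySem.Int.floordiv ((dd:ℤ) * ((dd:ℤ) - 1)) 2 +
          p * (45 - PySem.Int.floordiv ((dd:ℤ) * ((dd:ℤ) + 1)) 2) +
          (if (dd:ℤ) < (cc:ℤ) then p + 1 else p) * (dd:ℤ)) * w2) % pvM +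
        (suf + 1) * (dd:ℤ) * w) % pvM
    else
      (r + ((p + 1) * PySem.Int.floordiv ((dd:ℤ) * ((dd:ℤ) - 1)) 2 +
          p * (45 - PySem.Int.floordiv ((dd:ℤ) * ((dd:ℤ) + 1)) 2) +
          (if (dd:ℤ) < (cc:ℤ) then p + 1 else p) * (dd:ℤ)) * w2) % pvM) := by
  have h01 : (0:ℤ) ≤ 1 := by norm_num
  have h1M : (1:ℤ) < pvM := by norm_num [pvM]
  rcases lt_trichotomy ((dd:ℤ)) ((cc:ℤ)) with hcmp | hcmp | hcmp
  · have hne : ((dd:ℤ)) ≠ ((cc:ℤ)) := by omega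
    simp only [if_pos hcmp, if_neg hne]
    interval_cases dd <;>
      simp only [Nat.cast_ofNat, Nat.cast_zero, Nat.cast_one] <;>
      simp only [prA0, prA1, prA2, prA3, prA4, prA5, prA6, prA7, prA8, prA9,
        prB0, prB1, prB2, prB3, prB4, prB5, prB6, prB7, prB8, prB9,
        fdm0, fdm1, fdm2, fdm3, fdm4, fdm5, fdm6, fdm7, fdm8, fdm9,
        fdp0, fdp1, fdp2, fdp3, fdp4, fdp5, fdp6, fdp7, fdp8, fdp9] <;>
      simp only [List.foldl_cons, List.foldl_nil, mmul_eq] <;>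
      simp only [madd_eq, hp1, hp2, hr1, hr2, hs1, hs2, h01, h1M, emod_rng1, emod_rng2] <;>
      simp only [Int.emod_add_emod, Int.add_emod_emod] <;>
      (apply emod_congr) <;> push_cast [cast_emod_pvM] <;> ring
  · have hnlt : ¬((dd:ℤ) < (cc:ℤ)) := by omega
    have hgec : ((dd:ℤ)) ≥ ((cc:ℤ)) := by omega
    simp only [if_neg hnlt, if_pos hgec, if_pos hcmp]
    interval_cases dd <;>
      simp only [Nat.cast_ofNat, Nat.cast_zero, Nat.cast_one] <;>
      simp only [prA0, prA1, prA2, prA3, prA4, prA5, prA6, prA7, prA8, prA9,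
        prB0, prB1, prB2, prB3, prB4, prB5, prB6, prB7, prB8, prB9,
        fdm0, fdm1, fdm2, fdm3, fdm4, fdm5, fdm6, fdm7, fdm8, fdm9,
        fdp0, fdp1, fdp2, fdp3, fdp4, fdp5, fdp6, fdp7, fdp8, fdp9] <;>
      simp only [List.foldl_cons, List.foldl_nil, mmul_eq] <;>
      simp only [madd_eq, hp1, hp2, hr1, hr2, hs1, hs2, h01, h1M, emod_rng1, emod_rng2] <;>
      simp only [Int.emod_add_emod, Int.add_emod_emod] <;>
      (apply emod_congr) <;> push_cast [cast_emod_pvM] <;> ring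
  · have hnlt : ¬((dd:ℤ) < (cc:ℤ)) := by omega
    have hgec : ((dd:ℤ)) ≥ ((cc:ℤ)) := by omega
    have hne : ((dd:ℤ)) ≠ ((cc:ℤ)) := by omega
    simp only [if_neg hnlt, if_pos hgec, if_neg hne]
    interval_cases dd <;>
      simp only [Nat.cast_ofNat, Nat.cast_zero, Nat.cast_one] <;>
      simp only [prA0, prA1, prA2, prA3, prA4, prA5, prA6, prA7, prA8, prA9,
        prB0, prB1, prB2, prB3, prB4, prB5, prB6, prB7, prB8, prB9,
        fdm0, fdm1, fdm2, fdm3, fdm4, fdm5, fdm6, fdm7, fdm8, fdm9,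
        fdp0, fdp1, fdp2, fdp3, fdp4, fdp5, fdp6, fdp7, fdp8, fdp9] <;>
      simp only [List.foldl_cons, List.foldl_nil, mmul_eq] <;>
      simp only [madd_eq, hp1, hp2, hr1, hr2, hs1, hs2, h01, h1M, emod_rng1, emod_rng2] <;>
      simp only [Int.emod_add_emod, Int.add_emod_emod] <;>
      (apply emod_congr) <;> push_cast [cast_emod_pvM] <;> ring

theorem div_pow_step (ν k : ℕ) : ν / 10 ^ k = (ν / 10 ^ (k + 1)) * 10 + dig ν k := by
  have h := Nat.div_add_mod (ν / 10 ^ k) 10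
  rw [pow_succ, ← Nat.div_div_eq_div_mul]
  exact (by omega : 10 * (ν / 10 ^ k / 10) + ν / 10 ^ k % 10 = ν / 10 ^ k / 10 * 10 + ν / 10 ^ k % 10) ▸ h.symm

theorem mod_pow_step (ν k : ℕ) : ν % 10 ^ (k + 1) = dig ν k * 10 ^ k + ν % 10 ^ k := by
  rw [pow_succ, Nat.mod_mul]
  unfold dig
  ring

theorem digit_cast_rng (x : ℕ) (h : x < 10) : (0:ℤ) ≤ (x:ℤ) ∧ (x:ℤ) < pvM := by
  constructor
  · positivity
  · have : (x:ℤ) < 10 := by exact_mod_cast h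
    simp only [pvM]; omega


theorem sgetL (nu : ℕ) (h10 : 10 ≤ nu) (i : ℕ) (hi : i < (Nat.digits 10 nu).length + 2) :
    charInt (PySem.List.pyGetD ('0' :: '0' :: ((Nat.digits 10 nu).map Nat.digitChar).reverse) (i : ℤ) ' ')
      = ((dig nu ((Nat.digits 10 nu).length + 1 - i) : ℕ) : ℤ) := by
  have hlt : nu < 10 ^ (Nat.digits 10 nu).length := Nat.lt_base_pow_length_digits (by norm_num)
  have hlen : ('0' :: '0' :: ((Nat.digits 10 nu).map Nat.digitChar).reverse).length
      = (Nat.digits 10 nu).length + 2 := by simp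
  rw [PySem.List.pyGetD_of_nonneg _ _ (by positivity), Int.toNat_natCast,
      List.getD_eq_getElem _ _ (by omega)]
  match i with
  | 0 =>
    simp only [List.getElem_cons_zero]
    rw [show dig nu ((Nat.digits 10 nu).length + 1 - 0) = 0 by
      unfold dig
      rw [Nat.div_eq_of_lt (lt_of_lt_of_le hlt (Nat.pow_le_pow_right (by norm_num) (by omega)))]]
    decide
  | 1 =>
    simp only [List.getElem_cons_succ, List.getElem_cons_zero]
    rw [show dig nu ((Nat.digits 10 nu).length + 1 - 1) = 0 by
      unfold dig
      rw [Nat.div_eq_of_lt (lt_of_lt_of_le hlt (Nat.pow_le_pow_right (by norm_num) (by omega)))]]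
    decide
  | (j + 2) =>
    simp only [List.getElem_cons_succ]
    have hj : j < (Nat.digits 10 nu).length := by omega
    rw [List.getElem_reverse (by simpa using by omega)]
    rw [List.getElem_map]
    rw [digits_getElem nu _ (by simp; omega)]
    rw [charInt_digitChar _ (dig_lt _ _)]
    congr 2
    simp
    omega

theorem fnAltGo_rng (mN : ℕ) : ∀ (m r suf pw pw2 : ℤ), m.toNat ≤ mN → 0 ≤ r → r < pvM →
    0 ≤ fnAltGo m r suf pw pw2 ∧ fnAltGo m r suf pw pw2 < pvM := by
  induction mN with
  | zero =>
    intro m r suf pw pw2 hm h1 h2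
    rw [fnAltGo]
    rw [dif_neg (by omega)]
    exact ⟨h1, h2⟩
  | succ mN ih =>
    intro m r suf pw pw2 hm h1 h2
    rw [fnAltGo]
    split_ifs with h
    · simp only [PySem.Int.mod_eq_emod_of_pos Mpos]
      apply ih
      · have hfd : PySem.Int.floordiv m 10 = m / 10 := PySem.Int.floordiv_eq_ediv_of_pos (by norm_num)
        rw [hfd]; omega
      · split_ifs <;> exact emod_rng1 _
      · split_ifs <;> exact emod_rng2 _
    · exact ⟨h1, h2⟩


theorem corr (nu L : ℕ) (h10 : 10 ≤ nu) (hL2 : 2 ≤ L) (hνlt : nu < 10 ^ L) (hνge : 10 ^ (L - 1) ≤ nu)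
    (cs : List Char) (eE e2E aE bE : List ℤ)
    (hs : ∀ i : ℕ, i < L + 2 → charInt (PySem.List.pyGetD cs (i : ℤ) ' ') = ((dig nu (L + 1 - i) : ℕ) : ℤ))
    (he : ∀ j : ℕ, j < L + 2 → PySem.List.pyGetD eE ((j : ℕ) : ℤ) 0 = (10 : ℤ) ^ (L + 1 - j) % pvM)
    (he2 : ∀ j : ℕ, j < L + 2 → PySem.List.pyGetD e2E ((j : ℕ) : ℤ) 0 = (100 : ℤ) ^ (L + 1 - j) % pvM)
    (ha : ∀ j : ℕ, j < L + 3 → PySem.List.pyGetD aE ((j : ℕ) : ℤ) 0 = ((nu % 10 ^ (L + 2 - j) : ℕ) : ℤ) % pvM)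
    (hb : ∀ j : ℕ, j < L + 2 → PySem.List.pyGetD bE ((j : ℕ) : ℤ) 0 = ((nu / 10 ^ (L + 1 - j) : ℕ) : ℤ) % pvM) :
    ∀ (cnt k : ℕ) (r : ℤ), k + cnt = L → 0 ≤ r → r < pvM →
    ((List.range cnt).map (fun j : ℕ => ((L + 1 - k : ℕ) : ℤ) - (j : ℤ))).foldl
      (fun r i =>
      (PySem.List.pyRange (charInt (PySem.List.pyGetD cs (i - 1) ' ') + 1) 10 1).foldl
        (fun r j => madd r (mmul (mmul (PySem.List.pyGetD bE (i - 2) 0) j) (PySem.List.pyGetD e2E i 0)))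
        (if charInt (PySem.List.pyGetD cs (i - 1) ' ') = charInt (PySem.List.pyGetD cs i ' ') then
          madd
            (if charInt (PySem.List.pyGetD cs (i - 1) ' ') < charInt (PySem.List.pyGetD cs i ' ') then
              madd ((PySem.List.pyRange 1 (charInt (PySem.List.pyGetD cs (i - 1) ' ')) 1).foldl
                  (fun r j => madd r (mmul (mmul (madd (PySem.List.pyGetD bE (i - 2) 0) 1) j) (PySem.List.pyGetD e2E i 0))) r)
                (mmul (mmul (madd (PySem.List.pyGetD bE (i - 2) 0) 1) (charInt (PySem.List.pyGetD cs (i - 1) ' '))) (PySem.List.pyGetD e2E i 0))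
            else if charInt (PySem.List.pyGetD cs (i - 1) ' ') ≥ charInt (PySem.List.pyGetD cs i ' ') then
              madd ((PySem.List.pyRange 1 (charInt (PySem.List.pyGetD cs (i - 1) ' ')) 1).foldl
                  (fun r j => madd r (mmul (mmul (madd (PySem.List.pyGetD bE (i - 2) 0) 1) j) (PySem.List.pyGetD e2E i 0))) r)
                (mmul (mmul (PySem.List.pyGetD bE (i - 2) 0) (charInt (PySem.List.pyGetD cs (i - 1) ' '))) (PySem.List.pyGetD e2E i 0))
            else ((PySem.List.pyRange 1 (charInt (PySem.List.pyGetD cs (i - 1) ' ')) 1).foldl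
                  (fun r j => madd r (mmul (mmul (madd (PySem.List.pyGetD bE (i - 2) 0) 1) j) (PySem.List.pyGetD e2E i 0))) r))
            (mmul (mmul (madd (PySem.List.pyGetD aE (i + 1) 0) 1) (charInt (PySem.List.pyGetD cs (i - 1) ' '))) (PySem.List.pyGetD eE i 0))
        else
          (if charInt (PySem.List.pyGetD cs (i - 1) ' ') < charInt (PySem.List.pyGetD cs i ' ') then
              madd ((PySem.List.pyRange 1 (charInt (PySem.List.pyGetD cs (i - 1) ' ')) 1).foldl
                  (fun r j => madd r (mmul (mmul (madd (PySem.List.pyGetD bE (i - 2) 0) 1) j) (PySem.List.pyGetD e2E i 0))) r)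
                (mmul (mmul (madd (PySem.List.pyGetD bE (i - 2) 0) 1) (charInt (PySem.List.pyGetD cs (i - 1) ' '))) (PySem.List.pyGetD e2E i 0))
            else if charInt (PySem.List.pyGetD cs (i - 1) ' ') ≥ charInt (PySem.List.pyGetD cs i ' ') then
              madd ((PySem.List.pyRange 1 (charInt (PySem.List.pyGetD cs (i - 1) ' ')) 1).foldl
                  (fun r j => madd r (mmul (mmul (madd (PySem.List.pyGetD bE (i - 2) 0) 1) j) (PySem.List.pyGetD e2E i 0))) r)
                (mmul (mmul (PySem.List.pyGetD bE (i - 2) 0) (charInt (PySem.List.pyGetD cs (i - 1) ' '))) (PySem.List.pyGetD e2E i 0))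
            else ((PySem.List.pyRange 1 (charInt (PySem.List.pyGetD cs (i - 1) ' ')) 1).foldl
                  (fun r j => madd r (mmul (mmul (madd (PySem.List.pyGetD bE (i - 2) 0) 1) j) (PySem.List.pyGetD e2E i 0))) r)))) r
    = fnAltGo ((nu / 10 ^ k : ℕ) : ℤ) r (((nu % 10 ^ k : ℕ) : ℤ) % pvM) ((10 : ℤ) ^ k % pvM)
        ((100 : ℤ) ^ k % pvM) := by
  have m10 : ∀ a : ℤ, PySem.Int.mod a 10 = a % 10 := fun a => PySem.Int.mod_eq_emod_of_pos (by norm_num)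
  have mM : ∀ a : ℤ, PySem.Int.mod a pvM = a % pvM := fun a => PySem.Int.mod_eq_emod_of_pos Mpos
  have d10 : ∀ a : ℤ, PySem.Int.floordiv a 10 = a / 10 := fun a => PySem.Int.floordiv_eq_ediv_of_pos (by norm_num)
  have d100 : ∀ a : ℤ, PySem.Int.floordiv a 100 = a / 100 := fun a => PySem.Int.floordiv_eq_ediv_of_pos (by norm_num)
  intro cnt
  induction cnt with
  | zero =>
    intro k r hk hr1 hr2
    have hkL : k = L := by omega
    subst hkL
    simp only [List.range_zero, List.map_nil, List.foldl_nil]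
    rw [Nat.div_eq_of_lt hνlt, fnAltGo, dif_neg (by norm_num)]
  | succ c ih =>
    intro k r hk hr1 hr2
    have hkL : k + 1 ≤ L := by omega
    rw [range_map_cons, List.foldl_cons]
    rw [show ((L + 1 - k : ℕ) : ℤ) - ((0 : ℕ) : ℤ) = ((L + 1 - k : ℕ) : ℤ) by push_cast; ring]
    rw [show (List.range c).map (fun j : ℕ => ((L + 1 - k : ℕ) : ℤ) - ((j + 1 : ℕ) : ℤ))
        = (List.range c).map (fun j : ℕ => ((L + 1 - (k + 1) : ℕ) : ℤ) - (j : ℤ)) from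
      List.map_congr_left (fun x _ => by omega)]
    -- index normalizations at i = L + 1 - k
    rw [show ((L + 1 - k : ℕ) : ℤ) - 1 = ((L - k : ℕ) : ℤ) by omega]
    rw [show ((L + 1 - k : ℕ) : ℤ) - 2 = ((L - 1 - k : ℕ) : ℤ) by omega]
    rw [show ((L + 1 - k : ℕ) : ℤ) + 1 = ((L + 2 - k : ℕ) : ℤ) by omega]
    -- string accesses
    rw [hs (L - k) (by omega), hs (L + 1 - k) (by omega)]
    rw [show L + 1 - (L - k) = k + 1 by omega, show L + 1 - (L + 1 - k) = k by omega]
    -- array accesses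
    rw [hb (L - 1 - k) (by omega), show L + 1 - (L - 1 - k) = k + 2 by omega]
    rw [ha (L + 2 - k) (by omega), show L + 2 - (L + 2 - k) = k by omega]
    rw [he (L + 1 - k) (by omega), he2 (L + 1 - k) (by omega),
        show L + 1 - (L + 1 - k) = k by omega]
    -- B side: one step of fnAltGo
    have hpos : (0 : ℤ) < ((nu / 10 ^ k : ℕ) : ℤ) := by
      have h1 : 10 ^ k ≤ nu := le_trans (Nat.pow_le_pow_right (by norm_num) (by omega)) hνge
      have h2 : 1 ≤ nu / 10 ^ k := (Nat.one_le_div_iff (Nat.pow_pos (by norm_num))).mpr h1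
      exact_mod_cast h2
    rw [fnAltGo, dif_pos hpos]
    simp only [m10, mM, d10, d100]
    have ediv1 : ((nu / 10 ^ k : ℕ) : ℤ) / 10 = ((nu / 10 ^ (k + 1) : ℕ) : ℤ) := by
      rw [show nu / 10 ^ (k + 1) = nu / 10 ^ k / 10 by rw [Nat.div_div_eq_div_mul, pow_succ]]
      omega
    have ediv2 : ((nu / 10 ^ k : ℕ) : ℤ) / 100 = ((nu / 10 ^ (k + 2) : ℕ) : ℤ) := by
      rw [show nu / 10 ^ (k + 2) = nu / 10 ^ k / 100 by
        rw [Nat.div_div_eq_div_mul]; congr 1; rw [pow_add]; norm_num]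
      omega
    rw [ediv1, ediv2]
    rw [show ((nu / 10 ^ (k + 1) : ℕ) : ℤ) % 10 = ((dig nu (k + 1) : ℕ) : ℤ) by unfold dig; omega]
    rw [show ((nu / 10 ^ k : ℕ) : ℤ) % 10 = ((dig nu k : ℕ) : ℤ) by unfold dig; omega]
    -- the per-iteration equality
    rw [step_eq (((nu / 10 ^ (k + 2) : ℕ) : ℤ) % pvM) ((10 : ℤ) ^ k % pvM) ((100 : ℤ) ^ k % pvM)
      (((nu % 10 ^ k : ℕ) : ℤ) % pvM) r (dig nu (k + 1)) (dig nu k) (dig_lt _ _) (dig_lt _ _)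
      (emod_rng1 _) (emod_rng2 _) (emod_rng1 _) (emod_rng2 _) hr1 hr2]
    -- normalize the updated state
    rw [show (((nu % 10 ^ k : ℕ) : ℤ) % pvM + ((dig nu k : ℕ) : ℤ) * ((10 : ℤ) ^ k % pvM)) % pvM
        = ((nu % 10 ^ (k + 1) : ℕ) : ℤ) % pvM from by
      apply emod_congr
      conv_rhs => rw [mod_pow_step nu k]
      push_cast [cast_emod_pvM]
      ring]
    rw [show ((10 : ℤ) ^ k % pvM * 10) % pvM = (10 : ℤ) ^ (k + 1) % pvM from by
      apply emod_congr
      rw [pow_succ]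
      push_cast [cast_emod_pvM]
      try ring]
    rw [show ((100 : ℤ) ^ k % pvM * 100) % pvM = (100 : ℤ) ^ (k + 1) % pvM from by
      apply emod_congr
      rw [pow_succ]
      push_cast [cast_emod_pvM]
      try ring]
    exact ih (k + 1) _ (by omega) (by split_ifs <;> exact emod_rng1 _)
      (by split_ifs <;> exact emod_rng2 _)

theorem main10 (nu : ℕ) (h10 : 10 ≤ nu) : fn (nu : ℤ) = fn_alt (nu : ℤ) := by
  have hnge : ¬ ((nu : ℤ) < 10) := by omega
  have h0 : 0 < nu := by omega
  have hνlt : nu < 10 ^ (Nat.digits 10 nu).length := Nat.lt_base_pow_length_digits (by norm_num)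
  have hνge : 10 ^ ((Nat.digits 10 nu).length - 1) ≤ nu := by
    rw [Nat.digits_len 10 nu (by norm_num) (by omega)]
    simpa using Nat.pow_log_le_self 10 (by omega)
  set L := (Nat.digits 10 nu).length with hLdef
  have hL2 : 2 ≤ L := by
    by_contra hc
    have hle : (10:ℕ) ^ L ≤ 10 := by
      calc (10:ℕ) ^ L ≤ 10 ^ 1 := Nat.pow_le_pow_right (by norm_num) (by omega)
      _ = 10 := by norm_num
    omega
  unfold fn fn_alt
  rw [if_neg hnge, if_neg hnge]
  rw [toChars_eq nu h0]
  simp only []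
  set cs := '0' :: '0' :: (List.map Nat.digitChar (Nat.digits 10 nu)).reverse with hcs
  have hslen : cs.length = L + 2 := by rw [hcs]; simp [hLdef]
  rw [hslen]
  rw [show L + 2 - 1 = L + 1 by omega]
  rw [show L + 2 + 1 = L + 3 by omega]
  rw [show ((L + 2 : ℕ) : ℤ) - 2 = ((L : ℕ) : ℤ) by push_cast; ring]
  rw [show ((L + 2 : ℕ) : ℤ) - 1 = ((L + 1 : ℕ) : ℤ) by push_cast; ring]
  rw [pyRange_down ((L : ℕ) : ℤ) (-1) (by omega)]
  rw [show (((L : ℕ) : ℤ) - (-1)).toNat = L + 1 by omega]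
  rw [pyRange_down ((L + 1 : ℕ) : ℤ) 1 (by omega)]
  rw [show (((L + 1 : ℕ) : ℤ) - 1).toNat = L by omega]
  rw [pyRange_up 1 ((L + 2 : ℕ) : ℤ) (by omega)]
  rw [show (((L + 2 : ℕ) : ℤ) - 1).toNat = L + 1 by omega]
  rw [show (List.range (L + 1)).map (fun k : ℕ => ((L : ℕ) : ℤ) - (k : ℤ))
      = (List.range (L + 1)).map (fun k : ℕ => ((L + 1 : ℕ) : ℤ) - 1 - (k : ℤ)) from
    List.map_congr_left (fun x _ => by omega)]
  rw [show (List.range (L + 1)).map (fun k : ℕ => (1 : ℤ) + (k : ℤ))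
      = (List.range (L + 1)).map (fun k : ℕ => ((1 : ℕ) : ℤ) + (k : ℤ)) from
    List.map_congr_left (fun x _ => by omega)]
  rw [show (List.range L).map (fun k : ℕ => ((L + 1 : ℕ) : ℤ) - (k : ℤ))
      = (List.range L).map (fun j : ℕ => ((L + 1 - 0 : ℕ) : ℤ) - (j : ℤ)) from
    List.map_congr_left (fun x _ => by omega)]
  set eE := ((List.range (L + 1)).map (fun k : ℕ => ((L + 1 : ℕ) : ℤ) - 1 - (k : ℤ))).foldl
      (fun E i => E.set i.toNat (mmul (PySem.List.pyGetD E (i + 1) 0) 10))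
      ((List.replicate (L + 2) 0).set (L + 1) 1) with heE
  set e2E := ((List.range (L + 1)).map (fun k : ℕ => ((L + 1 : ℕ) : ℤ) - 1 - (k : ℤ))).foldl
      (fun E i => E.set i.toNat (mmul (PySem.List.pyGetD E (i + 1) 0) 100))
      ((List.replicate (L + 2) 0).set (L + 1) 1) with he2E
  set aE := ((List.range (L + 1)).map (fun k : ℕ => ((L + 1 : ℕ) : ℤ) - 1 - (k : ℤ))).foldl
      (fun A i => A.set i.toNat (madd (mmul (charInt (PySem.List.pyGetD cs i ' ')) (PySem.List.pyGetD eE i 0)) (PySem.List.pyGetD A (i + 1) 0)))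
      ((List.replicate (L + 3) 0).set (L + 1) (charInt (PySem.List.pyGetD cs ((L + 1 : ℕ) : ℤ) ' '))) with haE
  set bE := ((List.range (L + 1)).map (fun k : ℕ => ((1 : ℕ) : ℤ) + (k : ℤ))).foldl
      (fun B i => B.set i.toNat (madd (mmul (PySem.List.pyGetD B (i - 1) 0) 10) (charInt (PySem.List.pyGetD cs i ' '))))
      ((List.replicate (L + 2) 0).set 0 (charInt (PySem.List.pyGetD cs 0 ' '))) with hbE
  -- string access characterization
  have hsg : ∀ i : ℕ, i < L + 2 → charInt (PySem.List.pyGetD cs (i : ℤ) ' ')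
      = ((dig nu (L + 1 - i) : ℕ) : ℤ) := by
    intro i hi
    rw [hcs]
    rw [hLdef] at hi ⊢
    exact sgetL nu h10 i hi
  -- e array
  have heg : ∀ j : ℕ, j < L + 2 → PySem.List.pyGetD eE ((j : ℕ) : ℤ) 0 = (10 : ℤ) ^ (L + 1 - j) % pvM := by
    have hfold := fold_set_down (L + 2) (fun _ x => mmul x 10) (fun j => (10 : ℤ) ^ (L + 1 - j) % pvM)
      (L + 1) ((List.replicate (L + 2) 0).set (L + 1) 1) (by simp) (by omega)
      (fun j hj hj' => by
        simp only []
        have hj1 : j = L + 1 := by omega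
        subst hj1
        rw [List.getD_eq_getElem _ _ (by simp), List.getElem_set, if_pos rfl]
        rw [Nat.sub_self, pow_zero]
        norm_num [pvM])
      (fun j hj => by
        simp only []
        rw [mmul_eq, show L + 1 - j = (L + 1 - (j + 1)) + 1 by omega, pow_succ]
        apply emod_congr
        push_cast [cast_emod_pvM]
        ring)
    intro j hj
    rw [PySem.List.pyGetD_of_nonneg _ _ (by positivity), Int.toNat_natCast]
    exact hfold.2 j hj
  -- e2 array
  have he2g : ∀ j : ℕ, j < L + 2 → PySem.List.pyGetD e2E ((j : ℕ) : ℤ) 0 = (100 : ℤ) ^ (L + 1 - j) % pvM := by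
    have hfold := fold_set_down (L + 2) (fun _ x => mmul x 100) (fun j => (100 : ℤ) ^ (L + 1 - j) % pvM)
      (L + 1) ((List.replicate (L + 2) 0).set (L + 1) 1) (by simp) (by omega)
      (fun j hj hj' => by
        simp only []
        have hj1 : j = L + 1 := by omega
        subst hj1
        rw [List.getD_eq_getElem _ _ (by simp), List.getElem_set, if_pos rfl]
        rw [Nat.sub_self, pow_zero]
        norm_num [pvM])
      (fun j hj => by
        simp only []
        rw [mmul_eq, show L + 1 - j = (L + 1 - (j + 1)) + 1 by omega, pow_succ]
        apply emod_congr
        push_cast [cast_emod_pvM]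
        ring)
    intro j hj
    rw [PySem.List.pyGetD_of_nonneg _ _ (by positivity), Int.toNat_natCast]
    exact hfold.2 j hj
  -- a array
  have hag : ∀ j : ℕ, j < L + 3 → PySem.List.pyGetD aE ((j : ℕ) : ℤ) 0 = ((nu % 10 ^ (L + 2 - j) : ℕ) : ℤ) % pvM := by
    have hfold := fold_set_down (L + 3)
      (fun i x => madd (mmul (charInt (PySem.List.pyGetD cs i ' ')) (PySem.List.pyGetD eE i 0)) x)
      (fun j => ((nu % 10 ^ (L + 2 - j) : ℕ) : ℤ) % pvM)
      (L + 1) ((List.replicate (L + 3) 0).set (L + 1) (charInt (PySem.List.pyGetD cs ((L + 1 : ℕ) : ℤ) ' ')))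
      (by simp) (by omega)
      (fun j hj hj' => by
        simp only []
        rcases (by omega : j = L + 1 ∨ j = L + 2) with hj1 | hj1 <;> subst hj1
        · rw [List.getD_eq_getElem _ _ (by simp), List.getElem_set, if_pos rfl]
          rw [hsg (L + 1) (by omega), show L + 1 - (L + 1) = 0 by omega,
              show L + 2 - (L + 1) = 1 by omega]
          rw [show dig nu 0 = nu % 10 by simp [dig]]
          rw [pow_one]
          rw [Int.emod_eq_of_lt (by positivity) (by
            have hx : nu % 10 < 10 := Nat.mod_lt _ (by norm_num)
            have : ((nu % 10 : ℕ) : ℤ) < 10 := by exact_mod_cast hx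
            simp only [pvM]; omega)]
        · rw [List.getD_eq_getElem _ _ (by simp), List.getElem_set, if_neg (by omega),
              List.getElem_replicate]
          rw [show L + 2 - (L + 2) = 0 by omega, pow_zero, Nat.mod_one]
          simp)
      (fun j hj => by
        simp only []
        rw [hsg j (by omega), heg j (by omega)]
        rw [mmul_eq, madd_eq _ _ (emod_rng1 _) (emod_rng2 _) (emod_rng1 _) (emod_rng2 _)]
        rw [show L + 2 - (j + 1) = L + 1 - j by omega]
        conv_lhs => rw [show L + 2 - j = (L + 1 - j) + 1 by omega, mod_pow_step nu (L + 1 - j)]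
        apply emod_congr
        push_cast [cast_emod_pvM]
        ring)
    intro j hj
    rw [PySem.List.pyGetD_of_nonneg _ _ (by positivity), Int.toNat_natCast]
    exact hfold.2 j hj
  -- b array
  have hbg : ∀ j : ℕ, j < L + 2 → PySem.List.pyGetD bE ((j : ℕ) : ℤ) 0 = ((nu / 10 ^ (L + 1 - j) : ℕ) : ℤ) % pvM := by
    have hfold := fold_set_up (L + 2)
      (fun i x => madd (mmul x 10) (charInt (PySem.List.pyGetD cs i ' ')))
      (fun j => ((nu / 10 ^ (L + 1 - j) : ℕ) : ℤ) % pvM)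
      (L + 1) 1 ((List.replicate (L + 2) 0).set 0 (charInt (PySem.List.pyGetD cs 0 ' ')))
      (by simp) (by omega) (by omega)
      (fun j hj => by
        simp only []
        have hj0 : j = 0 := by omega
        subst hj0
        rw [List.getD_eq_getElem _ _ (by simp), List.getElem_set, if_pos rfl]
        have h0' := hsg 0 (by omega)
        rw [Nat.cast_zero] at h0'
        rw [h0']
        rw [show L + 1 - 0 = L + 1 by omega]
        rw [show dig nu (L + 1) = 0 by
          unfold dig
          rw [Nat.div_eq_of_lt (lt_of_lt_of_le hνlt (Nat.pow_le_pow_right (by norm_num) (by omega)))]]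
        rw [show nu / 10 ^ (L + 1) = 0 from
          Nat.div_eq_of_lt (lt_of_lt_of_le hνlt (Nat.pow_le_pow_right (by norm_num) (by omega)))]
        simp)
      (fun j hj1 hj2 => by
        simp only []
        rw [hsg j (by omega)]
        have hdr := digit_cast_rng (dig nu (L + 1 - j)) (dig_lt _ _)
        rw [mmul_eq, madd_eq _ _ (emod_rng1 _) (emod_rng2 _) hdr.1 hdr.2]
        rw [show L + 1 - (j - 1) = (L + 1 - j) + 1 by omega]
        conv_lhs => rw [div_pow_step nu (L + 1 - j)]
        apply emod_congr
        push_cast [cast_emod_pvM]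
        ring)
    intro j hj
    rw [PySem.List.pyGetD_of_nonneg _ _ (by positivity), Int.toNat_natCast]
    exact hfold.2 j (by omega)
  -- main loop: the rolling single pass of B computes A's accumulated r
  rw [corr nu L h10 hL2 hνlt hνge cs eE e2E aE bE hsg heg he2g hag hbg L 0 0 (by omega)
    (le_refl 0) Mpos]
  simp only [pow_zero, Nat.div_one, Nat.mod_one, Nat.cast_zero]
  rw [show (0 : ℤ) % pvM = 0 from Int.zero_emod _]
  rw [show (1 : ℤ) % pvM = 1 by norm_num [pvM]]
  -- final correction term
  have mM : ∀ a : ℤ, PySem.Int.mod a pvM = a % pvM := fun a => PySem.Int.mod_eq_emod_of_pos Mpos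
  simp only [mM]
  have hR := fnAltGo_rng ((nu : ℤ)).toNat ((nu : ℤ)) 0 0 1 1 (le_refl _) (le_refl 0) Mpos
  rw [mmul_eq, msub_eq _ _ (emod_rng1 _) (emod_rng2 _) hR.1 hR.2]
  apply emod_congr
  push_cast [cast_emod_pvM]
  ring

theorem main_eq (n : Int) : fn n = fn_alt n := by
  by_cases hn : n < 10
  · unfold fn fn_alt
    rw [if_pos hn, if_pos hn]
  · have h10 : 10 ≤ n.toNat := by omega
    have hcast : n = ((n.toNat : ℕ) : ℤ) := by omega
    rw [hcast]
    exact main10 n.toNat h10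

-- ===== VERDICT (by name: the statement is the Claim_ definition above) =====
theorem fn_spec : Claim_equal_fn := by
  intro n _
  unfold Spec_fn
  exact main_eq n
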